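-- pv_equiv track=rewrite | github.com/khive-ai/khive.d | src/khive/services/plan_archived/adaptive_models.py | _identify_basic_dependencies
-- ===== SOURCE A (Python) =====
-- from typing import Dict, List, Optional, Any, Protocol
--
-- def _identify_basic_dependencies(subtasks: List[str]) -> Dict[str, List[str]]:
--     """Identify basic dependencies between subtasks."""
--     dependencies = {}
--
--     # Simple rule: implementation depends on design, testing depends on implementation
--     for i, task in enumerate(subtasks):
--         task_lower = task.lower()
--         deps = []
--
--         if 'implement' in task_lower and i > 0:
--             # Implementation depends on previous design/analysis tasks
--             for j in range(i):
--                 if any(keyword in subtasks[j].lower()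
--                       for keyword in ['analyze', 'design', 'research']):
--                     deps.append(subtasks[j])
--
--         elif 'test' in task_lower:
--             # Testing depends on implementation
--             for j in range(i):
--                 if 'implement' in subtasks[j].lower():
--                     deps.append(subtasks[j])
--
--         if deps:
--             dependencies[task] = deps
--
--     return dependencies
-- ===== SOURCE B (Python) =====
-- from typing import Dict, List
--
-- def _identify_basic_dependencies(subtasks: List[str]) -> Dict[str, List[str]]:
--     """Identify basic dependencies between subtasks (single pass, running prefixes)."""
--     dependencies = {}
--     design_prefix = []   # tasks seen so far containing analyze/design/research
--     impl_prefix = []     # tasks seen so far containing implement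
--     for task in subtasks:
--         tl = task.lower()
--         if 'implement' in tl:
--             if design_prefix:
--                 dependencies[task] = design_prefix.copy()
--         elif 'test' in tl:
--             if impl_prefix:
--                 dependencies[task] = impl_prefix.copy()
--         if any(k in tl for k in ('analyze', 'design', 'research')):
--             design_prefix.append(task)
--         if 'implement' in tl:
--             impl_prefix.append(task)
--     return dependencies
-- ===== Notes on version B (the rewrite author's own statement) =====
-- stated objective: alternative
-- what changed: Single forward pass that lowercases each task once and maintains running prefix lists of design-like and implement tasks (copied when a dependent task is met), instead of A's per-task inner rescan that re-lowercases every earlier subtask; it trades A's worst-case quadratic rescans for prefix bookkeeping, not measured faster on typical inputs where implement/test tasks are rare.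
import Mathlib
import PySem

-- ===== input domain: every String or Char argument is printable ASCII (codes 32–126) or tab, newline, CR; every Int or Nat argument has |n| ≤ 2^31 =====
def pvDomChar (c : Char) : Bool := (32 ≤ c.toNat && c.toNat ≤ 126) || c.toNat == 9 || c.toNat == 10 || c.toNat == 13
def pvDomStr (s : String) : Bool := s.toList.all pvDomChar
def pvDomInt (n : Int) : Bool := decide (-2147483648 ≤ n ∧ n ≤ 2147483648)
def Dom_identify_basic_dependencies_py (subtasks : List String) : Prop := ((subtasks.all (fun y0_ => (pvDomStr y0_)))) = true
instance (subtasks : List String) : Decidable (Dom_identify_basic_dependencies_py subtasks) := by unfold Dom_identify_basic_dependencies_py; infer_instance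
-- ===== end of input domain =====

-- B replaces A's per-task inner rescans of all earlier subtasks by a single pass keeping running
-- prefix lists of qualifying tasks; the returned dependency map is proved identical.

-- ===== PORT A =====
def pvKeywordsA : List String := ["analyze", "design", "research"]

-- the body of A's 'for i, task in enumerate(subtasks)' loop (subtasks is the full list it indexes)
def pvStepA (subtasks : List String) (dependencies : PySem.Dict String (List String))
    (p : Int × String) : PySem.Dict String (List String) :=
  let i := p.1
  let task := p.2
  let task_lower := PySem.Str.lower task
  let deps : List String :=
    if PySem.Str.isIn "implement" task_lower && decide (0 < i) then
      (PySem.List.pyRange 0 i 1).foldl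
        (fun deps j =>
          if pvKeywordsA.any (fun keyword =>
               PySem.Str.isIn keyword (PySem.Str.lower (PySem.List.pyGetD subtasks j ""))) then
            deps ++ [PySem.List.pyGetD subtasks j ""]
          else deps) []
    else if PySem.Str.isIn "test" task_lower then
      (PySem.List.pyRange 0 i 1).foldl
        (fun deps j =>
          if PySem.Str.isIn "implement" (PySem.Str.lower (PySem.List.pyGetD subtasks j "")) then
            deps ++ [PySem.List.pyGetD subtasks j ""]
          else deps) []
    else []
  if deps ≠ [] then dependencies.insert task deps else dependencies

def identify_basic_dependencies_py (subtasks : List String) : List (String × List String) :=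
  ((PySem.List.enumerate subtasks 0).foldl (pvStepA subtasks) PySem.Dict.empty).items

-- ===== PORT B =====
def pvKeywordsB : List String := ["analyze", "design", "research"]

-- the body of B's single pass: state = (dependencies, design_prefix, impl_prefix)
def pvStepB (st : PySem.Dict String (List String) × List String × List String)
    (task : String) : PySem.Dict String (List String) × List String × List String :=
  let dependencies := st.1
  let design_prefix := st.2.1
  let impl_prefix := st.2.2
  let tl := PySem.Str.lower task
  let dependencies :=
    if PySem.Str.isIn "implement" tl then
      if design_prefix ≠ [] then dependencies.insert task design_prefix else dependencies
    else if PySem.Str.isIn "test" tl then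
      if impl_prefix ≠ [] then dependencies.insert task impl_prefix else dependencies
    else dependencies
  let design_prefix :=
    if pvKeywordsB.any (fun k => PySem.Str.isIn k tl) then design_prefix ++ [task]
    else design_prefix
  let impl_prefix :=
    if PySem.Str.isIn "implement" tl then impl_prefix ++ [task] else impl_prefix
  (dependencies, design_prefix, impl_prefix)

def identify_basic_dependencies_py_alt (subtasks : List String) : List (String × List String) :=
  (subtasks.foldl pvStepB (PySem.Dict.empty, [], [])).1.items

-- ===== PRECONDITION & SPEC =====
def Spec_identify_basic_dependencies_py (subtasks : List String) (out : List (String × List String)) : Prop := out = identify_basic_dependencies_py_alt subtasks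
instance (subtasks : List String) (out : List (String × List String)) : Decidable (Spec_identify_basic_dependencies_py subtasks out) := by unfold Spec_identify_basic_dependencies_py; infer_instance

-- ===== CLAIM (what is proved, stated in full; the proofs are below) =====
def Claim_equal_identify_basic_dependencies_py : Prop := ∀ (subtasks : List String), Dom_identify_basic_dependencies_py subtasks → Spec_identify_basic_dependencies_py subtasks (identify_basic_dependencies_py subtasks)

-- ===== LEMMAS AND PROOFS =====

-- the two predicates both programs test on earlier tasks
def pvIsDesign (t : String) : Bool := pvKeywordsA.any (fun k => PySem.Str.isIn k (PySem.Str.lower t))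
def pvIsImpl (t : String) : Bool := PySem.Str.isIn "implement" (PySem.Str.lower t)

-- A's inner scan over range(i) collecting matching subtasks[j] is the filtered length-i prefix
lemma pvInner_eq_filter (full : List String) (p : String → Bool) (i : Nat) (h : i ≤ full.length) :
    (PySem.List.pyRange 0 (i : Int) 1).foldl
      (fun deps j => if p (PySem.List.pyGetD full j "") then deps ++ [PySem.List.pyGetD full j ""] else deps) []
      = (full.take i).filter p := by
  induction i with
  | zero => simp [PySem.List.pyRange_one_eq_nil]
  | succ n ih =>
    have hn : n ≤ full.length := Nat.le_of_succ_le h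
    have hlt : n < full.length := Nat.lt_of_succ_le h
    have hcast : ((n + 1 : Nat) : Int) = (n : Int) + 1 := by push_cast; ring
    rw [hcast, PySem.List.pyRange_one_succ_right (by positivity), List.foldl_append, ih hn]
    have hget : PySem.List.pyGetD full (n : Int) "" = full[n] := by
      simp [List.getElem?_eq_getElem hlt]
    have htake : full.take (n + 1) = full.take n ++ [full[n]] :=
      List.take_succ_eq_append_getElem hlt
    simp only [List.foldl_cons, List.foldl_nil, hget, htake, List.filter_append]
    by_cases hp : p full[n] <;> simp [hp]

-- one step of A at index pre.length equals the dict part of one step of B on the matching state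
lemma pvStep_eq (pre : List String) (t : String) (rest : List String)
    (d : PySem.Dict String (List String)) :
    pvStepA (pre ++ t :: rest) d ((pre.length : Int), t)
      = (pvStepB (d, pre.filter pvIsDesign, pre.filter pvIsImpl) t).1 := by
  have hlen : pre.length ≤ (pre ++ t :: rest).length := by simp
  have htake : (pre ++ t :: rest).take pre.length = pre := by
    simp [List.take_append_of_le_length (Nat.le_refl _)]
  have hD := pvInner_eq_filter (pre ++ t :: rest) pvIsDesign pre.length hlen
  have hI := pvInner_eq_filter (pre ++ t :: rest) pvIsImpl pre.length hlen
  rw [htake] at hD hI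
  unfold pvStepA pvStepB pvIsDesign pvIsImpl at *
  by_cases himpl : PySem.Str.isIn "implement" (PySem.Str.lower t)
  · by_cases hpos : pre.length = 0
    · have hpre : pre = [] := List.eq_nil_of_length_eq_zero hpos
      subst hpre
      simp [PySem.List.pyRange_one_eq_nil]
    · have hpos' : (0 : Int) < (pre.length : Int) := by exact_mod_cast Nat.pos_of_ne_zero hpos
      simp only [himpl, Bool.true_and, hD, decide_eq_true_eq, if_pos hpos', if_true]
  · simp only [himpl, Bool.false_and, if_false, Bool.false_eq_true]
    by_cases htest : PySem.Str.isIn "test" (PySem.Str.lower t)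
    · simp only [htest, if_true, hI]
    · simp only [htest, if_false, Bool.false_eq_true, ne_eq, not_true_eq_false]

-- B's prefixes after one step are the filters of the grown prefix
lemma pvPrefix_eq (pre : List String) (t : String) (d : PySem.Dict String (List String)) :
    (pvStepB (d, pre.filter pvIsDesign, pre.filter pvIsImpl) t).2
      = ((pre ++ [t]).filter pvIsDesign, (pre ++ [t]).filter pvIsImpl) := by
  unfold pvStepB pvIsDesign pvIsImpl
  simp only [List.filter_append, List.filter_cons, List.filter_nil, pvKeywordsB, pvKeywordsA]
  refine Prod.ext ?_ ?_ <;> (split_ifs <;> simp)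

-- main invariant: A's fold over the remaining enumerated tasks equals the dict part of B's fold
lemma pvMain (rest : List String) : ∀ (pre : List String) (d : PySem.Dict String (List String)),
    ((PySem.List.enumerate rest (pre.length : Int)).foldl (pvStepA (pre ++ rest)) d)
      = (rest.foldl pvStepB (d, pre.filter pvIsDesign, pre.filter pvIsImpl)).1 := by
  induction rest with
  | nil => intro pre d; simp [PySem.List.enumerate]
  | cons t rest ih =>
    intro pre d
    rw [PySem.List.enumerate_cons, List.foldl_cons, List.foldl_cons, pvStep_eq pre t rest d]
    have hassoc : pre ++ t :: rest = (pre ++ [t]) ++ rest := by simp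
    have hB : pvStepB (d, pre.filter pvIsDesign, pre.filter pvIsImpl) t
        = ((pvStepB (d, pre.filter pvIsDesign, pre.filter pvIsImpl) t).1,
           (pre ++ [t]).filter pvIsDesign, (pre ++ [t]).filter pvIsImpl) := by
      rw [← pvPrefix_eq pre t d]
    rw [hB]
    have hlen1 : ((pre ++ [t]).length : Int) = (pre.length : Int) + 1 := by simp
    have := ih (pre ++ [t]) ((pvStepB (d, pre.filter pvIsDesign, pre.filter pvIsImpl) t).1)
    rw [hlen1, ← hassoc] at this
    exact this

-- ===== VERDICT (by name: the statement is the Claim_ definition above) =====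
theorem identify_basic_dependencies_py_spec : Claim_equal_identify_basic_dependencies_py := by
  intro subtasks _
  unfold Spec_identify_basic_dependencies_py identify_basic_dependencies_py identify_basic_dependencies_py_alt
  have := pvMain subtasks [] PySem.Dict.empty
  simp only [List.nil_append, List.length_nil, Nat.cast_zero, List.filter_nil] at this
  rw [this]
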